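-- pv_equiv track=rewrite | github.com/Maftuna0607/Week_6 | task1.py | summarize_sensor_data
-- ===== SOURCE A (Python) =====
-- def summarize_sensor_data (readings):
--     unique_items = []
--     for reading in readings:
--         if reading[0]not in unique_items:
--              unique_items.append(reading[0])
--     items_with_temp = []
--     for item in unique_items:
--         max_temp = 0
--         for reading in readings:
--             if item == reading[0] and max_temp < reading[1]:
--                 max_temp = reading[1]
--         items_with_temp.append((item,max_temp))
--         items_with_temp.sort()
--     return items_with_temp
-- ===== SOURCE B (Python) =====
-- def summarize_sensor_data(readings):
--     best = {}
--     for sensor_id, temp in readings: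
--         best[sensor_id] = max(best.get(sensor_id, 0), temp)
--     return sorted(best.items())
-- ===== Notes on version B (the rewrite author's own statement) =====
-- stated objective: faster
-- what changed: Replaces the membership-scan dedup plus per-id rescans of the whole list (with a re-sort after every append) by a single dict pass keeping the running max floored at 0 per id, followed by one final sort.
import Mathlib
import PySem

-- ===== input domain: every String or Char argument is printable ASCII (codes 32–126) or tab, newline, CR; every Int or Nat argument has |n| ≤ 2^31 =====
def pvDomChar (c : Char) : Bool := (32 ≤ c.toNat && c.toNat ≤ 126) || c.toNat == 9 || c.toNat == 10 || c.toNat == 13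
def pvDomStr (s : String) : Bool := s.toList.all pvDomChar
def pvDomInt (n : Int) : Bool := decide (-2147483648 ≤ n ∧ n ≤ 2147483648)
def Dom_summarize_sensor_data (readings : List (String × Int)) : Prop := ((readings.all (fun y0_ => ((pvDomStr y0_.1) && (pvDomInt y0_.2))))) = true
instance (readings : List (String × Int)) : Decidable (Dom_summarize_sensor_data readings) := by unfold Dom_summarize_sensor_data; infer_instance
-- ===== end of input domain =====

-- B replaces A's per-id rescans of the whole list (and re-sort after every append) by one
-- dict pass keeping the running max (floored at 0) per id, then a single final sort.

-- ===== PORT A =====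
def summarize_sensor_data (readings : List (String × Int)) : List (String × Int) :=
  -- first loop: collect unique ids in first-seen order
  let unique_items : List String :=
    readings.foldl (fun u reading => if reading.1 ∈ u then u else u ++ [reading.1]) []
  -- second loop: for each id, rescan readings for the max (starting at 0), append, sort
  unique_items.foldl (fun items_with_temp item =>
    let max_temp : Int :=
      readings.foldl (fun m reading =>
        if item == reading.1 && decide (m < reading.2) then reading.2 else m) 0
    PySem.List.sorted2 (items_with_temp ++ [(item, max_temp)]) (·.1) (·.2)) []

-- ===== PORT B =====
def summarize_sensor_data_alt (readings : List (String × Int)) : List (String × Int) :=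
  let best : PySem.Dict String Int :=
    readings.foldl (fun d p => d.insert p.1 (max (d.getD p.1 0) p.2)) PySem.Dict.empty
  PySem.List.sorted2 best.items (·.1) (·.2)

-- ===== PRECONDITION & SPEC =====
def Spec_summarize_sensor_data (readings : List (String × Int)) (out : List (String × Int)) : Prop := out = summarize_sensor_data_alt readings
instance (readings : List (String × Int)) (out : List (String × Int)) : Decidable (Spec_summarize_sensor_data readings out) := by unfold Spec_summarize_sensor_data; infer_instance

-- ===== CLAIM (what is proved, stated in full; the proofs are below) =====
def Claim_equal_summarize_sensor_data : Prop := ∀ (readings : List (String × Int)), Dom_summarize_sensor_data readings → Spec_summarize_sensor_data readings (summarize_sensor_data readings)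

-- ===== LEMMAS AND PROOFS =====

-- the Boolean comparator that PySem.List.sorted2 xs (·.1) (·.2) uses (Python tuple '<')
def pvBlt (a b : String × Int) : Bool :=
  decide (a.1 < b.1) || (!decide (b.1 < a.1) && decide (a.2 < b.2))

theorem pvBlt_iff (a b : String × Int) :
    pvBlt a b = true ↔ (a.1 < b.1 ∨ (a.1 = b.1 ∧ a.2 < b.2)) := by
  unfold pvBlt
  simp only [Bool.or_eq_true, Bool.and_eq_true, Bool.not_eq_true', decide_eq_true_eq,
    decide_eq_false_iff_not]
  constructor
  · rintro (h | ⟨h1, h2⟩)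
    · exact Or.inl h
    · rcases lt_or_ge a.1 b.1 with h' | h'
      · exact Or.inl h'
      · exact Or.inr ⟨le_antisymm (le_of_not_gt h1) h', h2⟩
  · rintro (h | ⟨h1, h2⟩)
    · exact Or.inl h
    · exact Or.inr ⟨by simp [h1], h2⟩

theorem pvBlt_asymm {a b : String × Int} (h : pvBlt a b = true) : pvBlt b a = false := by
  rw [pvBlt_iff] at h
  by_contra hc
  rw [Bool.not_eq_false, pvBlt_iff] at hc
  rcases h with h | ⟨h1, h2⟩ <;> rcases hc with h' | ⟨h1', h2'⟩
  · exact absurd h' (not_lt_of_gt h)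
  · exact absurd h1' (ne_of_gt h)
  · exact absurd h' (by rw [h1]; exact lt_irrefl _)
  · exact absurd h2' (not_lt_of_gt h2)

theorem pvBlt_trans_neg {x y z : String × Int} (h1 : pvBlt x y = true)
    (h2 : pvBlt z y = false) : pvBlt z x = false := by
  rw [pvBlt_iff] at h1
  by_contra hc
  rw [Bool.not_eq_false, pvBlt_iff] at hc
  rw [← Bool.not_eq_true, pvBlt_iff] at h2
  apply h2
  rcases h1 with h | ⟨ha, hb⟩ <;> rcases hc with h' | ⟨ha', hb'⟩
  · exact Or.inl (lt_trans h' h)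
  · exact Or.inl (lt_of_eq_of_lt ha' h)
  · exact Or.inl (lt_of_lt_of_eq h' ha)
  · exact Or.inr ⟨ha'.trans ha, lt_trans hb' hb⟩

theorem pvBlt_antisymm {a b : String × Int} (h1 : pvBlt a b = false)
    (h2 : pvBlt b a = false) : a = b := by
  rw [← Bool.not_eq_true, pvBlt_iff] at h1 h2
  have hs : a.1 = b.1 :=
    le_antisymm (le_of_not_gt (fun h => h2 (Or.inl h))) (le_of_not_gt (fun h => h1 (Or.inl h)))
  have hi : a.2 = b.2 :=
    le_antisymm (le_of_not_gt (fun h => h2 (Or.inr ⟨hs.symm, h⟩)))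
      (le_of_not_gt (fun h => h1 (Or.inr ⟨hs, h⟩)))
  exact Prod.ext hs hi

-- insertBy unfolding equations
theorem insertBy_nil (before : (String × Int) → (String × Int) → Bool) (x : String × Int) :
    PySem.List.insertBy before x [] = [x] := rfl

theorem insertBy_cons (before : (String × Int) → (String × Int) → Bool) (x y : String × Int)
    (ys : List (String × Int)) :
    PySem.List.insertBy before x (y :: ys) =
      if before x y then x :: y :: ys else y :: PySem.List.insertBy before x ys := rfl

-- the sorted-ness invariant: pairwise "not greater" wrt pvBlt
theorem insertBy_pairwise (x : String × Int) (l : List (String × Int))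
    (h : l.Pairwise (fun a b => pvBlt b a = false)) :
    (PySem.List.insertBy pvBlt x l).Pairwise (fun a b => pvBlt b a = false) := by
  induction l with
  | nil => simp [insertBy_nil]
  | cons y ys ih =>
    rw [insertBy_cons]
    rcases List.pairwise_cons.mp h with ⟨hy, hys⟩
    by_cases hxy : pvBlt x y = true
    · simp only [hxy, if_true]
      refine List.pairwise_cons.mpr ⟨?_, h⟩
      intro z hz
      rcases List.mem_cons.mp hz with rfl | hz
      · exact pvBlt_asymm hxy
      · exact pvBlt_trans_neg hxy (hy z hz)
    · rw [Bool.not_eq_true] at hxy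
      simp only [hxy, Bool.false_eq_true, if_false]
      refine List.pairwise_cons.mpr ⟨?_, ih hys⟩
      intro z hz
      rcases (PySem.List.mem_insertBy _ _ _ _).mp hz with rfl | hz
      · exact hxy
      · exact hy z hz

theorem sorted2_eq_foldl (xs : List (String × Int)) :
    PySem.List.sorted2 xs (·.1) (·.2) =
      xs.foldl (fun acc x => PySem.List.insertBy pvBlt x acc) [] := rfl

theorem sorted2_pairwise (xs : List (String × Int)) :
    (PySem.List.sorted2 xs (·.1) (·.2)).Pairwise (fun a b => pvBlt b a = false) := by
  rw [sorted2_eq_foldl]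
  suffices h : ∀ acc : List (String × Int), acc.Pairwise (fun a b => pvBlt b a = false) →
      (xs.foldl (fun acc x => PySem.List.insertBy pvBlt x acc) acc).Pairwise
        (fun a b => pvBlt b a = false) from h [] (List.Pairwise.nil)
  induction xs with
  | nil => intro acc h; simpa using h
  | cons x xs ih =>
    intro acc h
    exact ih _ (insertBy_pairwise x acc h)

-- sorted2 is determined by the multiset of elements
theorem sorted2_perm_invariant {xs ys : List (String × Int)} (h : xs.Perm ys) :
    PySem.List.sorted2 xs (·.1) (·.2) = PySem.List.sorted2 ys (·.1) (·.2) := by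
  have p1 : (PySem.List.sorted2 xs (·.1) (·.2)).Perm (PySem.List.sorted2 ys (·.1) (·.2)) :=
    ((PySem.List.sorted2_perm xs _ _ _).trans h).trans (PySem.List.sorted2_perm ys _ _ _).symm
  exact List.Perm.eq_of_pairwise (le := fun a b => pvBlt b a = false)
    (fun a b _ _ h1 h2 => pvBlt_antisymm h2 h1) (sorted2_pairwise xs) (sorted2_pairwise ys) p1

-- A's repeated append-then-sort loop is one final sort of the mapped list
theorem foldl_sort_append (g : String → String × Int) (items : List String) :
    ∀ L : List (String × Int),
      items.foldl (fun acc it => PySem.List.sorted2 (acc ++ [g it]) (·.1) (·.2))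
          (PySem.List.sorted2 L (·.1) (·.2)) =
        PySem.List.sorted2 (L ++ items.map g) (·.1) (·.2) := by
  induction items with
  | nil => intro L; simp
  | cons it items ih =>
    intro L
    have hstep : PySem.List.sorted2 (PySem.List.sorted2 L (·.1) (·.2) ++ [g it]) (·.1) (·.2) =
        PySem.List.sorted2 (L ++ [g it]) (·.1) (·.2) :=
      sorted2_perm_invariant ((PySem.List.sorted2_perm L _ _ _).append_right _)
    simp only [List.foldl_cons, List.map_cons, hstep, ih (L ++ [g it]), List.append_assoc,
      List.singleton_append]

theorem foldl_sort_nil (g : String → String × Int) (items : List String) :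
    items.foldl (fun acc it => PySem.List.sorted2 (acc ++ [g it]) (·.1) (·.2)) [] =
      PySem.List.sorted2 (items.map g) (·.1) (·.2) := by
  have h := foldl_sort_append g items []
  simpa using h

-- B's dict value at any id is A's running-max loop over the readings
theorem getD_fold_eq_max_loop (l : List (String × Int)) :
    ∀ (d : PySem.Dict String Int) (sid : String),
      (l.foldl (fun d p => d.insert p.1 (max (d.getD p.1 0) p.2)) d).getD sid 0 =
        l.foldl (fun m p => if sid == p.1 && decide (m < p.2) then p.2 else m) (d.getD sid 0) := by
  induction l with
  | nil => intro d sid; rfl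
  | cons p l ih =>
    intro d sid
    simp only [List.foldl_cons, ih]
    congr 1
    rw [PySem.Dict.getD_insert]
    by_cases hid : sid = p.1
    · subst hid
      simp only [beq_self_eq_true, Bool.true_and]
      by_cases hlt : d.getD p.1 0 < p.2
      · simp [hlt, max_eq_right (le_of_lt hlt)]
      · simp [hlt, max_eq_left (le_of_not_gt hlt)]
    · simp [hid]

-- A's unique-id loop is set(first components) in first-seen order
theorem uniq_eq_ofList (readings : List (String × Int)) :
    readings.foldl (fun u reading => if reading.1 ∈ u then u else u ++ [reading.1]) [] =
      PySem.Set.ofList (readings.map (·.1)) := by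
  have h : readings.foldl (fun u reading => if reading.1 ∈ u then u else u ++ [reading.1]) [] =
      readings.foldl (fun u reading => PySem.Set.add u reading.1) [] := by
    apply PySem.List.foldl_congr_mem
    intro acc x _
    rw [PySem.Set.add_eq_ite]
  rw [h, ← PySem.Set.update_map_eq_foldl_add, PySem.Set.update_nil_left]

-- ===== VERDICT (by name: the statement is the Claim_ definition above) =====
theorem summarize_sensor_data_spec : Claim_equal_summarize_sensor_data := by
  intro readings _
  unfold Spec_summarize_sensor_data
  set d := readings.foldl (fun d p => d.insert p.1 (max (d.getD p.1 0) p.2)) PySem.Dict.empty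
    with hd
  have hkeys : d.keys = PySem.Set.ofList (readings.map (·.1)) := by
    rw [hd, PySem.Dict.keys_foldl_insert_key]
    simp [PySem.Dict.keys_empty, PySem.Set.update_nil_left]
  have hnodup : d.keys.Nodup := by
    rw [hkeys]; exact PySem.Set.nodup_ofList _
  have hitems : d.items = d.keys.map (fun k => (k, d.getD k 0)) :=
    PySem.Dict.items_eq_map_keys d hnodup 0
  have hval : ∀ id : String, d.getD id 0 =
      readings.foldl (fun m p => if id == p.1 && decide (m < p.2) then p.2 else m) 0 := by
    intro id
    rw [hd, getD_fold_eq_max_loop]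
    simp [PySem.Dict.getD_empty]
  have hA : summarize_sensor_data readings =
      PySem.List.sorted2
        ((readings.foldl (fun u reading => if reading.1 ∈ u then u else u ++ [reading.1]) []).map
          (fun item => (item, readings.foldl
            (fun m p => if item == p.1 && decide (m < p.2) then p.2 else m) 0)))
        (·.1) (·.2) :=
    foldl_sort_nil _ _
  have hB : summarize_sensor_data_alt readings = PySem.List.sorted2 d.items (·.1) (·.2) := rfl
  rw [hA, hB, hitems, hkeys, uniq_eq_ofList]
  congr 1
  exact List.map_congr_left (fun k _ => by rw [hval k])
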